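-- pv_equiv track=rewrite | github.com/g-duff/JSON-journal | json_journal/report/balance.py | calculate_summaries
-- ===== SOURCE A (Python) =====
-- def calculate_summaries(balances):
--     new_balances = {}
--     for account_name in balances.keys():
--         account_name_components = account_name.split(':')
--         for i in range(len(account_name_components)):
--             super_account_name = ':'.join(account_name_components[:i+1])
--             if super_account_name in new_balances:
--                 new_balances[super_account_name] += balances[account_name]
--             else:
--                 new_balances[super_account_name] = balances[account_name]
--     return new_balances
-- ===== SOURCE B (Python) =====
-- def _prefixes(prefix, components):
--     # recursive chain of ':'-joined prefixes, built incrementally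
--     if not components:
--         return [prefix]
--     return [prefix] + _prefixes(prefix + ':' + components[0], components[1:])
--
--
-- def calculate_summaries(balances):
--     entries = []
--     for account_name, value in balances.items():
--         components = account_name.split(':')
--         entries.extend((prefix, value) for prefix in _prefixes(components[0], components[1:]))
--     totals = {}
--     for key, value in entries:
--         totals[key] = totals.get(key, 0) + value
--     return totals
-- ===== Notes on version B (the rewrite author's own statement) =====
-- stated objective: alternative
-- what changed: Replaces A's per-prefix re-split/re-slice/re-join inside a dict-membership-branching loop by a two-phase design: a recursive helper builds each account's prefix chain incrementally by string concatenation, all (prefix, value) entries are flattened into one stream, and a single aggregation pass sums them with dict.get.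
import Mathlib
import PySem

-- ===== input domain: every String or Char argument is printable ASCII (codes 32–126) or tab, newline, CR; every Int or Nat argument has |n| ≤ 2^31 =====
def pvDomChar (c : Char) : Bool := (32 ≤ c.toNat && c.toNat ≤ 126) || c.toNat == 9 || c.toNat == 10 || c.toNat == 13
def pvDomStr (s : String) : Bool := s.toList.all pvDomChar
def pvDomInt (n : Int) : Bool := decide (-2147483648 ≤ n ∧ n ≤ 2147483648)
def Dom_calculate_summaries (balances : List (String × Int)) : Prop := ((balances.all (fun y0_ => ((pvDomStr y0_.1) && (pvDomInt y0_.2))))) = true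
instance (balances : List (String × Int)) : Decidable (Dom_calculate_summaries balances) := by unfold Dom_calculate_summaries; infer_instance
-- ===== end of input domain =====

-- B replaces A's per-prefix re-split/slice/join loop with a recursive incremental prefix
-- chain, a flattened (prefix, value) stream and one aggregation pass (objective: alternative).

-- ===== PORT A =====
-- A iterates balances.keys() and looks up balances[account_name]; under Pre_ (distinct keys,
-- a Python dict's invariant) that lookup is the pair's own value kv.2.
def calculate_summaries (balances : List (String × Int)) : List (String × Int) :=
  (balances.foldl
    (fun nb kv =>
      -- account_name.split(':') with a nonempty separator never raises: getD [] is unreachable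
      let comps := (PySem.Str.split? kv.1 ":").getD []
      (PySem.List.pyRange 0 (comps.length : Int) 1).foldl
        (fun nb i =>
          let sup := PySem.Str.join ":" (PySem.List.slice comps none (some (i + 1)))
          if nb.contains sup then nb.insert sup (nb.getD sup 0 + kv.2)
          else nb.insert sup kv.2)
        nb)
    (PySem.Dict.empty : PySem.Dict String Int)).items

-- ===== PORT B =====
-- _prefixes(prefix, components) from Source B, recursion on the component list
def pvPrefixChain (pre : String) (components : List String) : List String :=
  match components with
  | [] => [pre]
  | c :: cs => pre :: pvPrefixChain (pre ++ ":" ++ c) cs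

def calculate_summaries_alt (balances : List (String × Int)) : List (String × Int) :=
  let entries := balances.foldl
    (fun acc kv =>
      acc ++ (match (PySem.Str.split? kv.1 ":").getD [] with
              | [] => []   -- unreachable: str.split(':') never returns an empty list
              | c :: cs => (pvPrefixChain c cs).map (fun p => (p, kv.2))))
    ([] : List (String × Int))
  (entries.foldl
    (fun totals kv => totals.insert kv.1 (totals.getD kv.1 0 + kv.2))
    (PySem.Dict.empty : PySem.Dict String Int)).items

-- ===== PRECONDITION & SPEC =====
-- Pre_ excludes association lists with duplicate keys: the parameter is a Python dict, which
-- cannot hold duplicates, so such lists correspond to no actual call of A.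
def Pre_calculate_summaries (balances : List (String × Int)) : Prop :=
  (balances.map Prod.fst).Nodup
instance (balances : List (String × Int)) : Decidable (Pre_calculate_summaries balances) := by
  unfold Pre_calculate_summaries; infer_instance

def pvWitness_calculate_summaries : (List (String × Int)) := [("a:b", 3), ("a", 2), ("c", -1)]

def Spec_calculate_summaries (balances : List (String × Int)) (out : List (String × Int)) : Prop := out = calculate_summaries_alt balances
instance (balances : List (String × Int)) (out : List (String × Int)) : Decidable (Spec_calculate_summaries balances out) := by unfold Spec_calculate_summaries; infer_instance

-- ===== CLAIM (what is proved, stated in full; the proofs are below) =====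
def Claim_equal_calculate_summaries : Prop := ∀ (balances : List (String × Int)), Dom_calculate_summaries balances → Pre_calculate_summaries balances → Spec_calculate_summaries balances (calculate_summaries balances)

-- ===== LEMMAS AND PROOFS =====

theorem pv_join_singleton (c : String) : PySem.Str.join ":" [c] = c := by
  apply String.toList_inj.mp
  simp [PySem.Str.toList_join, PySem.Chars.join_singleton]

theorem pv_join_cons_cons (a b : String) (rest : List String) :
    PySem.Str.join ":" (a :: b :: rest) = a ++ ":" ++ PySem.Str.join ":" (b :: rest) := by
  apply String.toList_inj.mp
  simp [PySem.Str.toList_join, PySem.Chars.join_cons_cons, String.toList_append]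

theorem pv_chain_map_append (components : List String) :
    ∀ (a p : String),
      (pvPrefixChain p components).map (fun s => a ++ s) = pvPrefixChain (a ++ p) components := by
  induction components with
  | nil => intro a p; simp [pvPrefixChain]
  | cons c cs ih =>
      intro a p
      simp only [pvPrefixChain, List.map_cons, ih]
      rw [← String.append_assoc, ← String.append_assoc]

theorem pv_chain_eq_joins (cs : List String) :
    ∀ (c : String),
      (List.range (cs.length + 1)).map
        (fun k => PySem.Str.join ":" ((c :: cs).take (k + 1))) = pvPrefixChain c cs := by
  induction cs with
  | nil =>
      intro c
      simp [pvPrefixChain, pv_join_singleton]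
  | cons d ds ih =>
      intro c
      rw [List.range_succ_eq_map]
      simp only [List.map_cons, List.map_map]
      have h0 : PySem.Str.join ":" ((c :: d :: ds).take (0 + 1)) = c := by
        simp [pv_join_singleton]
      have hsucc : ∀ k : Nat,
          PySem.Str.join ":" ((c :: d :: ds).take (Nat.succ k + 1))
            = (c ++ ":") ++ PySem.Str.join ":" ((d :: ds).take (k + 1)) := by
        intro k
        have : (c :: d :: ds).take (Nat.succ k + 1) = c :: (d :: ds).take (k + 1) := by
          simp [List.take_succ_cons]
        rw [this]
        have h2 : (d :: ds).take (k + 1) = d :: ds.take k := by simp [List.take_succ_cons]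
        rw [h2, pv_join_cons_cons, ← h2]
      have : (List.range (ds.length + 1)).map
            ((fun k => PySem.Str.join ":" ((c :: d :: ds).take (k + 1))) ∘ Nat.succ)
          = (List.range (ds.length + 1)).map
            (fun k => (c ++ ":") ++ PySem.Str.join ":" ((d :: ds).take (k + 1))) := by
        apply List.map_congr_left; intro k _
        simp only [Function.comp_apply]
        exact hsucc k
      simp only [List.length_cons]
      rw [this, h0]
      have hmap : (List.range (ds.length + 1)).map
            (fun k => (c ++ ":") ++ PySem.Str.join ":" ((d :: ds).take (k + 1)))
          = ((List.range (ds.length + 1)).map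
              (fun k => PySem.Str.join ":" ((d :: ds).take (k + 1)))).map
              (fun s => (c ++ ":") ++ s) := by
        rw [List.map_map]; rfl
      rw [hmap, ih d, pv_chain_map_append]
      rfl

theorem pv_dict_step_if (d : PySem.Dict String Int) (k : String) (v : Int) :
    (if d.contains k then d.insert k (d.getD k 0 + v) else d.insert k v)
      = d.insert k (d.getD k 0 + v) := by
  cases h : d.contains k with
  | true => rfl
  | false => simp [PySem.Dict.getD_of_not_contains d 0 h]

-- A's inner loop over one account equals B's aggregation pass over that account's entry block
theorem pv_inner_eq (comps : List String) (v : Int) (d : PySem.Dict String Int) :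
    (PySem.List.pyRange 0 (comps.length : Int) 1).foldl
      (fun nb i =>
        let sup := PySem.Str.join ":" (PySem.List.slice comps none (some (i + 1)))
        if nb.contains sup then nb.insert sup (nb.getD sup 0 + v) else nb.insert sup v) d
    = (match comps with
       | [] => ([] : List (String × Int))
       | c :: cs => (pvPrefixChain c cs).map (fun p => (p, v))).foldl
        (fun (totals : PySem.Dict String Int) (kv : String × Int) =>
          totals.insert kv.1 (totals.getD kv.1 0 + kv.2)) d := by
  cases comps with
  | nil => simp
  | cons c cs =>
      have hR : (((pvPrefixChain c cs).map (fun p => (p, v))).foldl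
            (fun (totals : PySem.Dict String Int) (kv : String × Int) =>
              totals.insert kv.1 (totals.getD kv.1 0 + kv.2)) d)
          = (pvPrefixChain c cs).foldl
              (fun t p => t.insert p (t.getD p 0 + v)) d := by
        rw [List.foldl_map]
      show _ = (((pvPrefixChain c cs).map (fun p => (p, v))).foldl
        (fun (totals : PySem.Dict String Int) (kv : String × Int) =>
          totals.insert kv.1 (totals.getD kv.1 0 + kv.2)) d)
      rw [hR, ← pv_chain_eq_joins cs c, List.foldl_map]
      rw [PySem.List.pyRange_one]
      rw [List.foldl_map]
      simp only [sub_zero, Int.toNat_natCast, List.length_cons]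
      apply PySem.List.foldl_congr_mem
      intro nb k _
      have hc : (0 : Int) + (k : Int) + 1 = ((k + 1 : Nat) : Int) := by push_cast; ring
      simp only [hc, PySem.List.slice_to_natCast]
      exact pv_dict_step_if nb _ v

theorem pv_fold_eq (balances : List (String × Int)) :
    ∀ (d : PySem.Dict String Int),
      balances.foldl
        (fun nb kv =>
          let comps := (PySem.Str.split? kv.1 ":").getD []
          (PySem.List.pyRange 0 (comps.length : Int) 1).foldl
            (fun nb i =>
              let sup := PySem.Str.join ":" (PySem.List.slice comps none (some (i + 1)))
              if nb.contains sup then nb.insert sup (nb.getD sup 0 + kv.2)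
              else nb.insert sup kv.2) nb) d
      = (balances.flatMap
          (fun kv => match (PySem.Str.split? kv.1 ":").getD [] with
                     | [] => []
                     | c :: cs => (pvPrefixChain c cs).map (fun p => (p, kv.2)))).foldl
          (fun totals kv => totals.insert kv.1 (totals.getD kv.1 0 + kv.2)) d := by
  induction balances with
  | nil => intro d; rfl
  | cons kv rest ih =>
      intro d
      rw [List.flatMap_cons, List.foldl_append, List.foldl_cons]
      rw [← pv_inner_eq ((PySem.Str.split? kv.1 ":").getD []) kv.2 d]
      exact ih _

-- ===== VERDICT (by name: the statement is the Claim_ definition above) =====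
theorem calculate_summaries_spec : Claim_equal_calculate_summaries := by
  intro balances _ _
  have h2 : List.foldl (fun (acc : List (String × Int)) (kv : String × Int) =>
      acc ++ (match (PySem.Str.split? kv.1 ":").getD [] with
              | [] => []
              | c :: cs => (pvPrefixChain c cs).map (fun p => (p, kv.2)))) [] balances
      = balances.flatMap (fun kv => match (PySem.Str.split? kv.1 ":").getD [] with
              | [] => []
              | c :: cs => (pvPrefixChain c cs).map (fun p => (p, kv.2))) := by
    rw [PySem.List.foldl_append_eq_flatMap, List.nil_append]
  unfold Spec_calculate_summaries calculate_summaries calculate_summaries_alt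
  rw [h2]
  exact congrArg PySem.Dict.items (pv_fold_eq balances PySem.Dict.empty)
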